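-- pv_equiv track=rewrite | github.com/google/oss-fuzz-gen | data_prep/clang-diagnostic/clang_diag_regex_gen.py | _replace_dollar_in_current_diff
-- ===== SOURCE A (Python) =====
-- def _replace_dollar_in_current_diff(sub: str) -> str:
--   char_list = list()
--   ptr = 0
--   bracket_level = 0
--   while ptr < len(sub):
--     ch = sub[ptr]
--     if ch == '{':
--       bracket_level += 1
--     if ch == '}':
--       bracket_level -= 1
--
--     if sub[ptr:ptr + 2] == '%$' and bracket_level == 0:
--       char_list.extend('$')
--       ptr += 1
--     elif sub[ptr] == '$' and bracket_level == 0: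
--       char_list.extend('%0')
--     else:
--       char_list.extend(ch)
--
--     ptr += 1
--   return ''.join(char_list)
-- ===== SOURCE B (Python) =====
-- def _sub_top(run: str) -> str:
--   # substitution on a top-level run: '%$' -> '$' (tried first, non-overlapping
--   # left to right), bare '$' -> '%0', everything else verbatim
--   out = []
--   i = 0
--   while i < len(run):
--     c = run[i]
--     if c == '%' and i + 1 < len(run) and run[i + 1] == '$':
--       out.append('$')
--       i += 2
--     elif c == '$':
--       out.append('%0')
--       i += 1
--     else:
--       out.append(c)
--       i += 1
--   return ''.join(out)
--
--
-- def _replace_dollar_in_current_diff(sub: str) -> str: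
--   # Phase 1: partition the string into maximal runs of constant "top-levelness"
--   # (running brace depth, updated before classifying each char, equals 0).
--   segs = []
--   cur = []
--   cur_top = True
--   depth = 0
--   for ch in sub:
--     if ch == '{':
--       depth += 1
--     elif ch == '}':
--       depth -= 1
--     top = depth == 0
--     if top != cur_top and cur:
--       segs.append((cur_top, ''.join(cur)))
--       cur = []
--     cur_top = top
--     cur.append(ch)
--   if cur:
--     segs.append((cur_top, ''.join(cur)))
--   # Phase 2: substitute only inside top-level runs.
--   return ''.join(_sub_top(r) if t else r for t, r in segs)
-- ===== Notes on version B (the rewrite author's own statement) =====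
-- stated objective: idiomatic
-- what changed: B splits the work into two phases: one pass partitions the string into maximal runs of constant brace-depth-zero-ness, then a depth-free percent-dollar/dollar substitution is applied to the top-level runs only, instead of A's single fused index loop mixing depth tracking, lookahead and substitution.
import Mathlib
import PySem

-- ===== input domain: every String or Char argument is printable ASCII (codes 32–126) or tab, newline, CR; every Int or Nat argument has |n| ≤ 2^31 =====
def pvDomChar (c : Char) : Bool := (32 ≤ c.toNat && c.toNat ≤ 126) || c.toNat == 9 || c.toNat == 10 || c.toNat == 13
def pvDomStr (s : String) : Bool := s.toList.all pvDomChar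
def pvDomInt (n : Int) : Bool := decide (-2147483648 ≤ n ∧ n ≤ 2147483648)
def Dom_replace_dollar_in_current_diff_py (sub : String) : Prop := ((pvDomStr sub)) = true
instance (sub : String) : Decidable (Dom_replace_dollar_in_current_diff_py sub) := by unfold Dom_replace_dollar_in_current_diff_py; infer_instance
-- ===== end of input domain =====

-- B restructures A's fused index loop as two phases (partition by brace depth, then a
-- depth-free substitution on top-level runs); same results, idiomatic decomposition.

-- ===== PORT A =====
-- literal transliteration of A's while loop: bracket_level updated by two ifs, then
-- the two-char lookahead (ported as head of the remaining chars), the bare-dollar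
-- branch, else the char verbatim; the escape branch advances ptr one extra step.
def pvAgo (lvl : Int) (l : List Char) : List Char :=
  match l with
  | [] => []
  | c :: rest =>
    let l1 := if c = '{' then lvl + 1 else lvl
    let l2 := if c = '}' then l1 - 1 else l1
    if c = '%' ∧ rest.head? = some '$' ∧ l2 = 0 then
      '$' :: pvAgo l2 rest.tail
    else if c = '$' ∧ l2 = 0 then
      '%' :: '0' :: pvAgo l2 rest
    else
      c :: pvAgo l2 rest
termination_by l.length
decreasing_by
  · simp only [List.length_cons, List.length_tail]; omega
  · simp
  · simp

def replace_dollar_in_current_diff_py (sub : String) : String :=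
  String.ofList (pvAgo 0 sub.toList)

-- ===== PORT B =====
-- _sub_top: the while loop of Source B (two-char escape first, then bare dollar, else verbatim)
def pvSubTop (l : List Char) : List Char :=
  match l with
  | [] => []
  | c :: rest =>
    if c = '%' ∧ rest.head? = some '$' then '$' :: pvSubTop rest.tail
    else if c = '$' then '%' :: '0' :: pvSubTop rest
    else c :: pvSubTop rest
termination_by l.length
decreasing_by
  · simp only [List.length_cons, List.length_tail]; omega
  · simp
  · simp

-- depth update of Source B's for loop (if/elif)
def pvStep (d : Int) (c : Char) : Int :=
  if c = '{' then d + 1 else if c = '}' then d - 1 else d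

-- phase 1 of Source B: partition into (top?, run) segments
def pvSeg (depth : Int) (curTop : Bool) (cur : List Char)
    (segs : List (Bool × List Char)) : List Char → List (Bool × List Char)
  | [] => if cur = [] then segs else segs ++ [(curTop, cur)]
  | c :: rest =>
    let d := pvStep depth c
    let top := decide (d = 0)
    if top ≠ curTop ∧ cur ≠ [] then
      pvSeg d top [c] (segs ++ [(curTop, cur)]) rest
    else
      pvSeg d top (cur ++ [c]) segs rest

-- phase 2 of Source B: substitute inside top-level runs only, join everything
def pvRender (segs : List (Bool × List Char)) : List Char :=
  (segs.map fun s => if s.1 then pvSubTop s.2 else s.2).flatten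

def replace_dollar_in_current_diff_py_alt (sub : String) : String :=
  String.ofList (pvRender (pvSeg 0 true [] [] sub.toList))

-- ===== PRECONDITION & SPEC =====
def Spec_replace_dollar_in_current_diff_py (sub : String) (out : String) : Prop := out = replace_dollar_in_current_diff_py_alt sub
instance (sub : String) (out : String) : Decidable (Spec_replace_dollar_in_current_diff_py sub out) := by unfold Spec_replace_dollar_in_current_diff_py; infer_instance

-- ===== CLAIM (what is proved, stated in full; the proofs are below) =====
def Claim_equal_replace_dollar_in_current_diff_py : Prop := ∀ (sub : String), Dom_replace_dollar_in_current_diff_py sub → Spec_replace_dollar_in_current_diff_py sub (replace_dollar_in_current_diff_py sub)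

-- ===== LEMMAS AND PROOFS =====

-- a run whose chars all sit at nonzero depth (after the update)
def RunNT : Int → List Char → Prop
  | _, [] => True
  | d, c :: cs => pvStep d c ≠ 0 ∧ RunNT (pvStep d c) cs

-- a run at depth 0 throughout: no braces, possibly after one leading brace landing on 0
def NoBraces (l : List Char) : Prop := ∀ c ∈ l, c ≠ '{' ∧ c ≠ '}'

def TopRun (d0 : Int) (l : List Char) : Prop :=
  (d0 = 0 ∧ NoBraces l) ∨
  (∃ c cs, l = c :: cs ∧ (c = '{' ∨ c = '}') ∧ pvStep d0 c = 0 ∧ NoBraces cs)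

lemma pvAgo_cons (lvl : Int) (c : Char) (rest : List Char) :
    pvAgo lvl (c :: rest) =
      (if c = '%' ∧ rest.head? = some '$' ∧ pvStep lvl c = 0 then
        '$' :: pvAgo (pvStep lvl c) rest.tail
      else if c = '$' ∧ pvStep lvl c = 0 then
        '%' :: '0' :: pvAgo (pvStep lvl c) rest
      else
        c :: pvAgo (pvStep lvl c) rest) := by
  rw [pvAgo, pvStep]
  by_cases h1 : c = '{' <;> by_cases h2 : c = '}' <;> simp [h1, h2]

lemma A_skip_run (r : List Char) : ∀ (d : Int) (l : List Char), RunNT d r →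
    pvAgo d (r ++ l) = r ++ pvAgo (List.foldl pvStep d r) l := by
  induction r with
  | nil => intro d l _; simp
  | cons c cs ih =>
    intro d l h
    obtain ⟨hne, hrest⟩ := h
    rw [List.cons_append, pvAgo_cons]
    rw [if_neg (by rintro ⟨_, _, h0⟩; exact hne h0),
      if_neg (by rintro ⟨_, h0⟩; exact hne h0)]
    rw [ih (pvStep d c) l hrest]
    simp

lemma A_top_run_aux (n : Nat) : ∀ (r l : List Char), r.length ≤ n → NoBraces r →
    l.head? ≠ some '$' → pvAgo 0 (r ++ l) = pvSubTop r ++ pvAgo 0 l := by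
  induction n with
  | zero =>
    intro r l hr _ _
    have : r = [] := by cases r with | nil => rfl | cons a b => simp at hr
    subst this; simp [pvSubTop]
  | succ n ih =>
    intro r l hr hnb hl
    cases r with
    | nil => simp [pvSubTop]
    | cons c rest =>
      have hstep : pvStep 0 c = 0 := by
        have := hnb c (by simp); simp [pvStep, this.1, this.2]
      have hnbrest : NoBraces rest := fun x hx => hnb x (by simp [hx])
      rw [List.cons_append, pvAgo_cons, pvSubTop]
      by_cases hpair : c = '%' ∧ rest.head? = some '$'
      · obtain ⟨d, rest', rfl⟩ : ∃ d rest', rest = d :: rest' := by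
          cases rest with
          | nil => simp at hpair
          | cons a b => exact ⟨a, b, rfl⟩
        have hd : d = '$' := by simpa using hpair.2
        rw [if_pos ⟨hpair.1, by simp [hd], hstep⟩, if_pos hpair]
        simp only [List.tail_cons, List.cons_append, List.tail_cons]
        rw [hstep, ih rest' l (by simp at hr; omega)
          (fun x hx => hnbrest x (by simp [hx])) hl]
      · have hA : ¬ (c = '%' ∧ (rest ++ l).head? = some '$' ∧ pvStep 0 c = 0) := by
          rintro ⟨h1, h2, _⟩
          cases rest with
          | nil => simp at h2; exact hl (by simp [h2])
          | cons a b =>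
            simp only [List.cons_append, List.head?_cons, Option.some.injEq] at h2
            exact hpair ⟨h1, by simp [h2]⟩
        rw [if_neg hA, if_neg hpair]
        by_cases hds : c = '$'
        · rw [if_pos ⟨hds, hstep⟩, if_pos hds]
          rw [hstep, ih rest l (by simp at hr; omega) hnbrest hl]
          simp
        · rw [if_neg (fun h => hds h.1), if_neg hds]
          rw [hstep, ih rest l (by simp at hr; omega) hnbrest hl]
          simp

lemma A_top_run (r : List Char) : ∀ (l : List Char), NoBraces r → l.head? ≠ some '$' →
    pvAgo 0 (r ++ l) = pvSubTop r ++ pvAgo 0 l := fun l =>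
  A_top_run_aux r.length r l le_rfl

lemma A_top_run' (d0 : Int) (r l : List Char) (h : TopRun d0 r) (hl : l.head? ≠ some '$') :
    pvAgo d0 (r ++ l) = pvSubTop r ++ pvAgo 0 l := by
  rcases h with ⟨rfl, hnb⟩ | ⟨c, cs, rfl, hbr, hstep, hnb⟩
  · exact A_top_run r l hnb hl
  · have hnp : c ≠ '%' ∧ c ≠ '$' := by
      rcases hbr with rfl | rfl <;> exact ⟨by decide, by decide⟩
    rw [List.cons_append, pvAgo_cons]
    simp only [hnp.1, false_and, if_false, hnp.2, hstep]
    rw [A_top_run cs l hnb hl, pvSubTop]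
    simp only [hnp.1, false_and, if_false, hnp.2]
    simp

lemma RunNT_snoc (r : List Char) : ∀ (d0 : Int) (c : Char), RunNT d0 r →
    pvStep (List.foldl pvStep d0 r) c ≠ 0 → RunNT d0 (r ++ [c]) := by
  induction r with
  | nil => intro d0 c _ h; exact ⟨by simpa using h, trivial⟩
  | cons a as ih =>
    intro d0 c h hc
    exact ⟨h.1, ih (pvStep d0 a) c h.2 (by simpa using hc)⟩

lemma NoBraces_snoc (r : List Char) (c : Char) (h : NoBraces r)
    (hc : c ≠ '{' ∧ c ≠ '}') : NoBraces (r ++ [c]) := by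
  intro x hx
  rcases List.mem_append.1 hx with hm | hm
  · exact h x hm
  · simp only [List.mem_singleton] at hm
    subst hm; exact hc

lemma TopRun_snoc (d0 : Int) (r : List Char) (c : Char) (h : TopRun d0 r)
    (hc : c ≠ '{' ∧ c ≠ '}') : TopRun d0 (r ++ [c]) := by
  rcases h with ⟨rfl, hnb⟩ | ⟨b, cs, rfl, hbr, hstep, hnb⟩
  · exact Or.inl ⟨rfl, NoBraces_snoc r c hnb hc⟩
  · exact Or.inr ⟨b, cs ++ [c], by simp, hbr, hstep, NoBraces_snoc cs c hnb hc⟩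

lemma pvRender_append (a b : List (Bool × List Char)) :
    pvRender (a ++ b) = pvRender a ++ pvRender b := by
  simp [pvRender]

lemma pvSeg_accum (l : List Char) : ∀ (d : Int) (t : Bool) (cur : List Char)
    (segs : List (Bool × List Char)),
    pvRender (pvSeg d t cur segs l) = pvRender segs ++ pvRender (pvSeg d t cur [] l) := by
  induction l with
  | nil =>
    intro d t cur segs
    simp only [pvSeg]
    by_cases h : cur = []
    · rw [if_pos h, if_pos h]; simp [pvRender]
    · rw [if_neg h, if_neg h, pvRender_append]; simp
  | cons c rest ih =>
    intro d t cur segs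
    rw [pvSeg, pvSeg]
    by_cases h : (decide (pvStep d c = 0) ≠ t ∧ cur ≠ [])
    · rw [if_pos h, if_pos h]
      rw [ih, ih (pvStep d c) _ [c] ([] ++ [(t, cur)])]
      simp [pvRender]
    · rw [if_neg h, if_neg h]
      exact ih _ _ _ _

-- the central invariant: the B pipeline with a pending run equals A restarted
-- before that pending run
lemma main_inv (l : List Char) : ∀ (d0 : Int) (cur : List Char),
    (List.foldl pvStep d0 cur = 0 → TopRun d0 cur) →
    (List.foldl pvStep d0 cur ≠ 0 → RunNT d0 cur) →
    pvRender (pvSeg (List.foldl pvStep d0 cur) (decide (List.foldl pvStep d0 cur = 0)) cur [] l)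
      = pvAgo d0 (cur ++ l) := by
  induction l with
  | nil =>
    intro d0 cur h1 h2
    by_cases hc : cur = []
    · subst hc; simp [pvSeg, pvRender, pvAgo]
    · rw [pvSeg]
      simp only [hc, if_false]
      by_cases hd : List.foldl pvStep d0 cur = 0
      · have := A_top_run' d0 cur [] (h1 hd) (by simp)
        simp only [List.append_nil] at this
        simp [pvRender, hd, this, pvAgo]
      · have := A_skip_run cur d0 [] (h2 hd)
        simp only [List.append_nil] at this
        simp [pvRender, hd, this, pvAgo]
  | cons c rest ih =>
    intro d0 cur h1 h2
    rw [pvSeg]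
    set d := List.foldl pvStep d0 cur with hd
    set d' := pvStep d c with hd'
    have hfold : List.foldl pvStep d0 (cur ++ [c]) = d' := by simp [hd, hd']
    by_cases hfl : (decide (d' = 0) ≠ decide (d = 0) ∧ cur ≠ [])
    · -- flush: topness changed and cur nonempty
      rw [if_pos hfl]
      rw [pvSeg_accum]
      have hbrace : c = '{' ∨ c = '}' := by
        by_contra hnc
        push Not at hnc
        have : d' = d := by simp [hd', pvStep, hnc.1, hnc.2]
        rw [this] at hfl; simp at hfl
      have hIH := ih d [c]
        (by intro h; right; exact ⟨c, [], rfl, hbrace, by simpa using h, fun x hx => by simp at hx⟩)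
        (by intro h; exact ⟨by simpa using h, trivial⟩)
      simp only [List.foldl_cons, List.foldl_nil, List.cons_append, List.nil_append] at hIH
      simp only [← hd'] at hIH
      rw [hIH]
      by_cases hd0 : d = 0
      · -- top cur flushes; the boundary char is a brace, in particular not '$'
        have hnotd : (c :: rest).head? ≠ some '$' := by
          rcases hbrace with rfl | rfl <;> simp
        rw [A_top_run' d0 cur (c :: rest) (h1 hd0) hnotd]
        simp [pvRender, hd0]
      · rw [A_skip_run cur d0 (c :: rest) (h2 hd0)]
        simp only [pvRender, hd0]
        simp
        rw [hd]
    · -- no flush: extend cur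
      rw [if_neg hfl]
      by_cases hc : cur = []
      · subst hc
        simp only [List.foldl_nil] at hd
        have hIH := ih d0 [c]
          (by intro h
              simp only [List.foldl_cons, List.foldl_nil] at h
              by_cases hbr : c = '{' ∨ c = '}'
              · right; exact ⟨c, [], rfl, hbr, by rw [← hd'] at *; simpa using h,
                  fun x hx => by simp at hx⟩
              · push Not at hbr
                left
                refine ⟨?_, fun x hx => by simp at hx; simp [hx, hbr.1, hbr.2]⟩
                have : pvStep d0 c = d0 := by simp [pvStep, hbr.1, hbr.2]
                rw [this] at h; exact h)
          (by intro h
              simp only [List.foldl_cons, List.foldl_nil] at h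
              exact ⟨h, trivial⟩)
        simp only [List.foldl_cons, List.foldl_nil] at hIH
        rw [← hd] at hIH
        simpa using hIH
      · have hsame : (decide (d' = 0)) = (decide (d = 0)) := by
          by_contra hne
          exact hfl ⟨hne, hc⟩
        have hIH := ih d0 (cur ++ [c])
          (by intro h
              rw [hfold] at h
              have hdz : d = 0 := by
                have hx := hsame; rw [h] at hx; simpa using hx.symm
              refine TopRun_snoc d0 cur c (h1 hdz) ?_
              constructor
              · intro hcc; subst hcc
                have : d' = d + 1 := by simp [hd', pvStep]
                omega
              · intro hcc; subst hcc
                have : d' = d - 1 := by simp [hd', pvStep, (by decide : ('}' : Char) ≠ '{')]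
                omega)
          (by intro h
              rw [hfold] at h
              have hdz : d ≠ 0 := by
                intro h0
                have hx := hsame; rw [h0] at hx
                exact h (by simpa using hx)
              exact RunNT_snoc cur d0 c (h2 hdz) (by rw [← hd, ← hd']; exact h))
        rw [hfold] at hIH
        simpa using hIH

-- ===== VERDICT (by name: the statement is the Claim_ definition above) =====
theorem replace_dollar_in_current_diff_py_spec : Claim_equal_replace_dollar_in_current_diff_py := by
  intro sub _
  unfold Spec_replace_dollar_in_current_diff_py replace_dollar_in_current_diff_py
    replace_dollar_in_current_diff_py_alt
  have h := main_inv sub.toList 0 []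
    (by intro _; left; exact ⟨rfl, fun x hx => by simp at hx⟩)
    (by intro h; simp at h)
  simp only [List.foldl_nil, List.nil_append] at h
  rw [← h]
  simp
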